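-- pv_equiv track=rewrite | github.com/nehamsoni/stock-share-provider | stockprice.py | get_ticker
-- ===== SOURCE A (Python) =====
-- def get_ticker(arr):
--     us={'symbol':''}
--     bol=True
--     for i in arr:
--         if i['exchDisp']=='NSE' or i['exchDisp']=='Bombay':
--             return i
--         if (i['exchDisp']=='NASDAQ' and bol==True) or (i['exchDisp']=='NYSE' and bol==True):
--             us=i
--             bol=False
--     if len(us['symbol'])>0:
--         return us
--     return arr[0]
-- ===== SOURCE B (Python) =====
-- def get_ticker(arr):
--     # Two separate phase searches instead of A's single stateful pass with a flag.
--     indian = next((i for i in arr if i['exchDisp'] in ('NSE', 'Bombay')), None)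
--     if indian is not None:
--         return indian
--     us = next((i for i in arr if i['exchDisp'] in ('NASDAQ', 'NYSE')), None)
--     if us is not None and len(us['symbol']) > 0:
--         return us
--     return arr[0]
-- ===== Notes on version B (the rewrite author's own statement) =====
-- stated objective: simpler
-- what changed: Replaces A's single stateful pass (us accumulator dict + bol flag) with two independent first-match searches: first for NSE/Bombay, then for the first NASDAQ/NYSE entry, falling back to arr[0].
import Mathlib
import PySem

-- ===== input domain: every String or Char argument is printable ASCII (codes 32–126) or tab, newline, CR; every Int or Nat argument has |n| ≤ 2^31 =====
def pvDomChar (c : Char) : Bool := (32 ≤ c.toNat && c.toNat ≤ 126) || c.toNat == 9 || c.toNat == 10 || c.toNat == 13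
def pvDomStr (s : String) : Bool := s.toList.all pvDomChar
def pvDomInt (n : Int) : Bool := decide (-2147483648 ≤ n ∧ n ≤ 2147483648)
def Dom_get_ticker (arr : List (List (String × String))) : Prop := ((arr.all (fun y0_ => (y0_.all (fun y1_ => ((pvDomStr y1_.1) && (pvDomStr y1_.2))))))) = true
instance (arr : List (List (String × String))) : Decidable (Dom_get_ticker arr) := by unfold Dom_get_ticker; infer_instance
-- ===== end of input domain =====

-- B replaces A's single stateful pass (accumulator dict + flag) with two independent
-- first-match searches; same O(n) cost, simpler decomposition. Equivalence of return values.

-- d[k] as first-match association-list lookup (exact where the key is present; Pre_ guarantees that)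
def pvLook (d : List (String × String)) (k : String) : String := (d.lookup k).getD ""

-- ===== PORT A =====
def get_tickerLoop (arr0 : List (List (String × String))) :
    List (List (String × String)) → List (String × String) → Bool → List (String × String)
  | [], us, _ =>
      if PySem.Str.len (pvLook us "symbol") > 0 then us else arr0.headD []
  | i :: rest, us, bol =>
      if pvLook i "exchDisp" = "NSE" ∨ pvLook i "exchDisp" = "Bombay" then i
      else if (pvLook i "exchDisp" = "NASDAQ" ∧ bol = true) ∨ (pvLook i "exchDisp" = "NYSE" ∧ bol = true) then
        get_tickerLoop arr0 rest i false
      else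
        get_tickerLoop arr0 rest us bol

def get_ticker (arr : List (List (String × String))) : List (String × String) :=
  get_tickerLoop arr arr [("symbol", "")] true

-- ===== PORT B =====
-- next((i for i in arr if i['exchDisp'] in targets), None)
def pvFindExch (targets : List String) :
    List (List (String × String)) → Option (List (String × String))
  | [] => none
  | i :: rest => if pvLook i "exchDisp" ∈ targets then some i else pvFindExch targets rest

def get_ticker_alt (arr : List (List (String × String))) : List (String × String) :=
  match pvFindExch ["NSE", "Bombay"] arr with
  | some indian => indian
  | none =>
      match pvFindExch ["NASDAQ", "NYSE"] arr with
      | some us => if PySem.Str.len (pvLook us "symbol") > 0 then us else arr.headD []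
      | none => arr.headD []

-- ===== PRECONDITION & SPEC =====
-- A raises IndexError on arr[0] when arr is empty and no exchange matched, and KeyError on a
-- missing 'exchDisp' key of any element scanned before the first NSE/Bombay match (or of all
-- elements when there is none) and on a missing 'symbol' key of the first NASDAQ/NYSE element
-- when no NSE/Bombay element exists. Pre_ is exactly the complement of that raise set
-- (elements are dicts, so keys are taken by first match).
def Pre_get_ticker (arr : List (List (String × String))) : Prop :=
  (∀ d ∈ arr.takeWhile (fun d => !(pvLook d "exchDisp" == "NSE" || pvLook d "exchDisp" == "Bombay")),
      "exchDisp" ∈ d.map Prod.fst) ∧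
  ((arr.takeWhile (fun d => !(pvLook d "exchDisp" == "NSE" || pvLook d "exchDisp" == "Bombay"))).length = arr.length →
    arr ≠ [] ∧
    ∀ u, arr.find? (fun d => pvLook d "exchDisp" == "NASDAQ" || pvLook d "exchDisp" == "NYSE") = some u →
      "symbol" ∈ u.map Prod.fst)
instance (arr : List (List (String × String))) : Decidable (Pre_get_ticker arr) := by
  unfold Pre_get_ticker; infer_instance

def pvWitness_get_ticker : (List (List (String × String))) :=
  [[("exchDisp", "NYSE"), ("symbol", "AAPL")], [("exchDisp", "NSE"), ("symbol", "TCS")]]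

def Spec_get_ticker (arr : List (List (String × String))) (out : List (String × String)) : Prop := out = get_ticker_alt arr
instance (arr : List (List (String × String))) (out : List (String × String)) : Decidable (Spec_get_ticker arr out) := by unfold Spec_get_ticker; infer_instance

-- ===== CLAIM (what is proved, stated in full; the proofs are below) =====
def Claim_equal_get_ticker : Prop := ∀ (arr : List (List (String × String))), Dom_get_ticker arr → Pre_get_ticker arr → Spec_get_ticker arr (get_ticker arr)

-- ===== LEMMAS AND PROOFS =====

-- Once the flag is down, the rest of A's loop is exactly B's NSE/Bombay search with a fixed fallback.
theorem loop_false (arr0 l : List (List (String × String))) (us : List (String × String)) :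
    get_tickerLoop arr0 l us false =
      match pvFindExch ["NSE", "Bombay"] l with
      | some i => i
      | none => if PySem.Str.len (pvLook us "symbol") > 0 then us else arr0.headD [] := by
  induction l with
  | nil => simp [get_tickerLoop, pvFindExch]
  | cons i rest ih =>
      by_cases h : pvLook i "exchDisp" = "NSE" ∨ pvLook i "exchDisp" = "Bombay"
      · simp [get_tickerLoop, pvFindExch, h]
      · have h' : pvLook i "exchDisp" ∉ (["NSE", "Bombay"] : List String) := by
          simpa using h
        simp [get_tickerLoop, pvFindExch, h, h', ih]

-- With the flag up and an empty-symbol accumulator, A's loop is B's two searches.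
theorem loop_true (arr0 l : List (List (String × String))) (us : List (String × String))
    (hus : pvLook us "symbol" = "") :
    get_tickerLoop arr0 l us true =
      match pvFindExch ["NSE", "Bombay"] l with
      | some i => i
      | none =>
          match pvFindExch ["NASDAQ", "NYSE"] l with
          | some u => if PySem.Str.len (pvLook u "symbol") > 0 then u else arr0.headD []
          | none => arr0.headD [] := by
  induction l with
  | nil => simp [get_tickerLoop, pvFindExch, hus]
  | cons i rest ih =>
      by_cases h1 : pvLook i "exchDisp" = "NSE" ∨ pvLook i "exchDisp" = "Bombay"
      · simp [get_tickerLoop, pvFindExch, h1]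
      · have h1' : pvLook i "exchDisp" ∉ (["NSE", "Bombay"] : List String) := by simpa using h1
        by_cases h2 : pvLook i "exchDisp" = "NASDAQ" ∨ pvLook i "exchDisp" = "NYSE"
        · have h2' : pvLook i "exchDisp" ∈ (["NASDAQ", "NYSE"] : List String) := by simpa using h2
          have e1 : get_tickerLoop arr0 (i :: rest) us true = get_tickerLoop arr0 rest i false := by
            rcases h2 with h | h <;> simp [get_tickerLoop, h]
          rw [e1, loop_false]
          simp [pvFindExch, h1', h2']
        · have h2' : pvLook i "exchDisp" ∉ (["NASDAQ", "NYSE"] : List String) := by simpa using h2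
          have hN : ¬ pvLook i "exchDisp" = "NASDAQ" := fun h => h2 (Or.inl h)
          have hY : ¬ pvLook i "exchDisp" = "NYSE" := fun h => h2 (Or.inr h)
          simp only [get_tickerLoop, if_neg h1, hN, hY]
          rw [ih]
          simp [pvFindExch, h1', h2']

-- ===== VERDICT (by name: the statement is the Claim_ definition above) =====
theorem get_ticker_spec : Claim_equal_get_ticker := by
  intro arr _ _
  unfold Spec_get_ticker get_ticker get_ticker_alt
  rw [loop_true arr arr [("symbol", "")] (by rfl)]
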